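-- pv_equiv track=rewrite | github.com/zhaowenping/cbeta | dict/hk.py | hk2sa
-- ===== SOURCE A (Python) =====
-- def hk2sa(str_in):
--     '''hk系统转拉丁梵语, 会有两个结果，分别是t1和t2'''
--     x = {'S':'sh',
--         'R':'\u1e5bi',
--         'RR':'\u1e5b\u012b'}
--
--     t1 = {'A': '\u0101',
--         'I':'\u012b',
--         'U':'\u016b',
--         'M':'\u1e43', # 1e49
--         'H':'\u1e25',
--         'G':'\u1e45',
--         'J':'\u00f1',
--         'T':'\u1e6d',
--         'D':'\u1e0d',
--         'N':'\u1e47',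
--         'L':'\u1eca',
--         'z':'\u1e61',
--         }
--
--     t2 = {'A': '\u0101',
--         'I':'\u012b',
--         'U':'\u016b',
--         'M':'\u1e49', # 1e49
--         'H':'\u1e25',
--         'G':'\u1e45',
--         'J':'\u00f1',
--         'T':'\u1e6d',
--         'D':'\u1e0d',
--         'N':'\u1e47',
--         'L':'\u1eca',
--         'z':'\u1e61',
--         }
--
--     t1 = {ord(k): ord(t1[k]) for k in t1}
--     t2 = {ord(k): ord(t2[k]) for k in t2}
--     str_out = str_in.replace('S', 'sh').replace('RR', '\u1e5b\u012b').replace('R', '\u1e5bi')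
--     str_out = str_out.translate(t1)
--     return str_out
-- ===== SOURCE B (Python) =====
-- def hk2sa(str_in):
--     '''hk -> Latin Sanskrit (t1 variant) in one left-to-right scan'''
--     mapping = {'A': '\u0101', 'I': '\u012b', 'U': '\u016b', 'M': '\u1e43',
--                'H': '\u1e25', 'G': '\u1e45', 'J': '\u00f1', 'T': '\u1e6d',
--                'D': '\u1e0d', 'N': '\u1e47', 'L': '\u1eca', 'z': '\u1e61'}
--     out = []
--     i = 0
--     n = len(str_in)
--     while i < n:
--         ch = str_in[i]
--         if ch == 'S':
--             out.append('sh')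
--             i += 1
--         elif ch == 'R':
--             if i + 1 < n and str_in[i + 1] == 'R':
--                 out.append('\u1e5b\u012b')
--                 i += 2
--             else:
--                 out.append('\u1e5bi')
--                 i += 1
--         else:
--             out.append(mapping.get(ch, ch))
--             i += 1
--     return ''.join(out)
-- ===== Notes on version B (the rewrite author's own statement) =====
-- stated objective: alternative
-- what changed: Replaced A's three chained str.replace passes plus a translate pass (four traversals with intermediate strings) by a single left-to-right scan with a one-character lookahead for a doubled R that emits each output piece directly.
import Mathlib
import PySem

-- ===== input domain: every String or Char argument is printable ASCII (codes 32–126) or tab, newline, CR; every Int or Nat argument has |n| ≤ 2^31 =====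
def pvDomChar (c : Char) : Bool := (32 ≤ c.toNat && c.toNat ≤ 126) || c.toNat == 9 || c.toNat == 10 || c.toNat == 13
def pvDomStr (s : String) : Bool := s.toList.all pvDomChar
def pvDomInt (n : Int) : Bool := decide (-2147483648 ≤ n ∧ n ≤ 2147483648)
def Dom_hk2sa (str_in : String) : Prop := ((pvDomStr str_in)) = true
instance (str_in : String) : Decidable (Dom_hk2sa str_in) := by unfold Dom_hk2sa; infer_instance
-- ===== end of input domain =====

-- B replaces A's three chained str.replace passes plus translate by one left-to-right
-- scan with an RR lookahead (objective: alternative decomposition, single pass).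

-- ===== PORT A =====
-- the t1 translation table (Python builds it as a char-code dict; ported as a Char→Char
-- dict, exact because translate maps single code points)
def hk2saT1 : PySem.Dict Char Char :=
  PySem.Dict.ofList
    [('A', 'ā'), ('I', 'ī'), ('U', 'ū'), ('M', 'ṃ'), ('H', 'ḥ'), ('G', 'ṅ'),
     ('J', 'ñ'), ('T', 'ṭ'), ('D', 'ḍ'), ('N', 'ṇ'), ('L', 'Ị'), ('z', 'ṡ')]

def hk2sa (str_in : String) : String :=
  -- Python's x and t2 dicts are built but never used for the returned value; omitted.
  let str_out :=
    PySem.Str.replace (PySem.Str.replace (PySem.Str.replace str_in "S" "sh") "RR" "ṛī") "R" "ṛi"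
  -- str.translate(t1): map every code point through the dict (identity when absent) — exact
  String.ofList (str_out.toList.map (fun c => hk2saT1.getD c c))

-- ===== PORT B =====
def hk2saMapping : PySem.Dict Char Char :=
  PySem.Dict.ofList
    [('A', 'ā'), ('I', 'ī'), ('U', 'ū'), ('M', 'ṃ'), ('H', 'ḥ'), ('G', 'ṅ'),
     ('J', 'ñ'), ('T', 'ṭ'), ('D', 'ḍ'), ('N', 'ṇ'), ('L', 'Ị'), ('z', 'ṡ')]

-- the while-loop of Source B: one pass, emitting per character, with lookahead for 'RR'
def hk2saScan : List Char → List Char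
  | [] => []
  | 'S' :: t => 's' :: 'h' :: hk2saScan t
  | 'R' :: 'R' :: t => 'ṛ' :: 'ī' :: hk2saScan t
  | 'R' :: t => 'ṛ' :: 'i' :: hk2saScan t
  | c :: t => hk2saMapping.getD c c :: hk2saScan t

def hk2sa_alt (str_in : String) : String :=
  String.ofList (hk2saScan str_in.toList)

-- ===== PRECONDITION & SPEC =====
def Spec_hk2sa (str_in : String) (out : String) : Prop := out = hk2sa_alt str_in
instance (str_in : String) (out : String) : Decidable (Spec_hk2sa str_in out) := by unfold Spec_hk2sa; infer_instance

-- ===== CLAIM (what is proved, stated in full; the proofs are below) =====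
def Claim_equal_hk2sa : Prop := ∀ (str_in : String), Dom_hk2sa str_in → Spec_hk2sa str_in (hk2sa str_in)

-- ===== LEMMAS AND PROOFS =====

-- the effect of str.replace with pattern "S"
def repS : List Char → List Char
  | [] => []
  | c :: t => if c = 'S' then 's' :: 'h' :: repS t else c :: repS t

-- the effect of str.replace with pattern "RR"
def repRR : List Char → List Char
  | [] => []
  | 'R' :: 'R' :: t => 'ṛ' :: 'ī' :: repRR t
  | c :: t => c :: repRR t

-- the effect of str.replace with pattern "R"
def repR : List Char → List Char
  | [] => []
  | c :: t => if c = 'R' then 'ṛ' :: 'i' :: repR t else c :: repR t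

-- generic: replace.go computes any function `rep` that rewrites leftmost-first
theorem go_spec (old new : List Char) (hold : old ≠ [])
    (rep : List Char → List Char) (hnil : rep [] = [])
    (hpre : ∀ l, old.isPrefixOf l = true → rep l = new ++ rep (l.drop old.length))
    (hnpre : ∀ c t, old.isPrefixOf (c :: t) = false → rep (c :: t) = c :: rep t) :
    ∀ (fuel : Nat) (l acc : List Char), l.length ≤ fuel →
      PySem.Chars.replace.go old new fuel l acc = acc.reverse ++ rep l := by
  intro fuel
  induction fuel with
  | zero =>
    intro l acc hl
    have : l = [] := List.length_eq_zero_iff.mp (Nat.le_zero.mp hl)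
    subst this
    simp [PySem.Chars.replace.go, hnil]
  | succ n ih =>
    intro l acc hl
    cases l with
    | nil => simp [PySem.Chars.replace.go, hnil]
    | cons c t =>
      rw [PySem.Chars.replace.go]
      by_cases hp : old.isPrefixOf (c :: t) = true
      · have hdrop : ((c :: t).drop old.length).length ≤ n := by
          have h1 : 1 ≤ old.length := List.length_pos_iff.mpr hold
          have h2 : (c :: t).length ≤ n + 1 := hl
          rw [List.length_drop]
          simp only [List.length_cons] at h2
          omega
        rw [if_pos hp, ih _ _ hdrop, hpre _ hp]
        simp
      · have hp' : old.isPrefixOf (c :: t) = false := by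
          cases h : old.isPrefixOf (c :: t) with
          | false => rfl
          | true => exact absurd h hp
        have ht : t.length ≤ n := by simp at hl; omega
        rw [if_neg hp, ih _ _ ht, hnpre _ _ hp']
        simp

theorem replace_eq (old new : List Char) (hold : old ≠ [])
    (rep : List Char → List Char) (hnil : rep [] = [])
    (hpre : ∀ l, old.isPrefixOf l = true → rep l = new ++ rep (l.drop old.length))
    (hnpre : ∀ c t, old.isPrefixOf (c :: t) = false → rep (c :: t) = c :: rep t)
    (s : List Char) : PySem.Chars.replace s old new = rep s := by
  rw [PySem.Chars.replace]
  rw [if_neg (by simpa using hold)]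
  simpa using go_spec old new hold rep hnil hpre hnpre s.length s [] (le_refl _)

theorem replaceS_eq (s : List Char) :
    PySem.Chars.replace s ['S'] ['s', 'h'] = repS s := by
  refine replace_eq _ _ (by simp) repS rfl ?_ ?_ s
  · intro l hp
    cases l with
    | nil => simp [List.isPrefixOf] at hp
    | cons c t =>
      simp [List.isPrefixOf] at hp
      subst hp
      simp [repS]
  · intro c t hp
    simp [List.isPrefixOf] at hp
    have hc : c ≠ 'S' := fun h => hp h.symm
    simp [repS, hc]

theorem replaceR_eq (s : List Char) :
    PySem.Chars.replace s ['R'] ['ṛ', 'i'] = repR s := by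
  refine replace_eq _ _ (by simp) repR rfl ?_ ?_ s
  · intro l hp
    cases l with
    | nil => simp [List.isPrefixOf] at hp
    | cons c t =>
      simp [List.isPrefixOf] at hp
      subst hp
      simp [repR]
  · intro c t hp
    simp [List.isPrefixOf] at hp
    have hc : c ≠ 'R' := fun h => hp h.symm
    simp [repR, hc]

theorem repRR_cons_of_ne (c : Char) (t : List Char) (hc : c ≠ 'R') :
    repRR (c :: t) = c :: repRR t := by
  cases t with
  | nil => simp [repRR]
  | cons d u =>
    rcases eq_or_ne c 'R' with h | h
    · exact absurd h hc
    · rcases eq_or_ne d 'R' with hd | hd <;> subst_vars <;> simp_all [repRR]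

theorem repRR_cons_R_of_ne (t : List Char) (h : t.head? ≠ some 'R') :
    repRR ('R' :: t) = 'R' :: repRR t := by
  cases t with
  | nil => simp [repRR]
  | cons d u =>
    rcases eq_or_ne d 'R' with hd | hd
    · subst hd; simp at h
    · simp_all [repRR]

theorem replaceRR_eq (s : List Char) :
    PySem.Chars.replace s ['R', 'R'] ['ṛ', 'ī'] = repRR s := by
  refine replace_eq _ _ (by simp) repRR rfl ?_ ?_ s
  · intro l hp
    cases l with
    | nil => simp [List.isPrefixOf] at hp
    | cons c t =>
      cases t with
      | nil => simp [List.isPrefixOf] at hp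
      | cons d u =>
        simp [List.isPrefixOf] at hp
        obtain ⟨hc, hd⟩ := hp
        subst hc; subst hd
        simp [repRR]
  · intro c t hp
    rcases eq_or_ne c 'R' with hc | hc
    · subst hc
      have ht : t.head? ≠ some 'R' := by
        intro h
        cases t with
        | nil => simp at h
        | cons d u =>
          simp at h
          subst h
          simp [List.isPrefixOf] at hp
      exact repRR_cons_R_of_ne t ht
    · exact repRR_cons_of_ne c t hc

-- after replaceS, the head is 'R' exactly when the original head is 'R'
theorem repS_head_ne_R (t : List Char) (h : t.head? ≠ some 'R') :
    (repS t).head? ≠ some 'R' := by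
  cases t with
  | nil => simp [repS]
  | cons c u =>
    rcases eq_or_ne c 'S' with hc | hc
    · subst hc; simp [repS]
    · simp_all [repS]

-- the main composition: A's whole pipeline equals B's single scan
theorem pipeline_eq_scan (s : List Char) :
    (repR (repRR (repS s))).map (fun c => hk2saT1.getD c c) = hk2saScan s := by
  induction s using hk2saScan.induct with
  | case1 => simp [repS, repRR, repR, hk2saScan]
  | case2 t ih =>
    have h1 : repS ('S' :: t) = 's' :: 'h' :: repS t := by simp [repS]
    rw [h1, repRR_cons_of_ne 's' _ (by decide), repRR_cons_of_ne 'h' _ (by decide)]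
    have h2 : ∀ x, repR ('s' :: 'h' :: x) = 's' :: 'h' :: repR x := by
      intro x; simp [repR]
    rw [h2]
    simp only [List.map_cons, ih, hk2saScan]
    rfl
  | case3 t ih =>
    have h1 : repS ('R' :: 'R' :: t) = 'R' :: 'R' :: repS t := by simp [repS]
    have h2 : repRR ('R' :: 'R' :: repS t) = 'ṛ' :: 'ī' :: repRR (repS t) := by
      simp [repRR]
    have h3 : ∀ x, repR ('ṛ' :: 'ī' :: x) = 'ṛ' :: 'ī' :: repR x := by
      intro x; simp [repR]
    rw [h1, h2, h3]
    simp only [List.map_cons, ih, hk2saScan]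
    rfl
  | case4 t hne ih =>
    have hhead : t.head? ≠ some 'R' := by
      intro h
      cases t with
      | nil => simp at h
      | cons d u => simp at h; exact hne u (by rw [h])
    have h1 : repS ('R' :: t) = 'R' :: repS t := by simp [repS]
    have h2 := repRR_cons_R_of_ne (repS t) (repS_head_ne_R t hhead)
    have h3 : ∀ x, repR ('R' :: x) = 'ṛ' :: 'i' :: repR x := by
      intro x; simp [repR]
    have hscan : hk2saScan ('R' :: t) = 'ṛ' :: 'i' :: hk2saScan t := by
      cases t with
      | nil => simp [hk2saScan]
      | cons d u =>
        simp [hk2saScan]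
    rw [h1, h2, h3, hscan]
    simp only [List.map_cons, ih]
    rfl
  | case5 c t h1 h2 h3 ih =>
    have hS : c ≠ 'S' := fun h => h1 h
    have hR : c ≠ 'R' := fun h => h3 h
    have e1 : repS (c :: t) = c :: repS t := by simp [repS, hS]
    have e2 := repRR_cons_of_ne c (repS t) hR
    have e3 : repR (c :: repRR (repS t)) = c :: repR (repRR (repS t)) := by
      simp [repR, hR]
    have escan : hk2saScan (c :: t) = hk2saMapping.getD c c :: hk2saScan t := by
      cases t with
      | nil => simp [hk2saScan]
      | cons d u => simp [hk2saScan]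
    rw [e1, e2, e3, escan]
    simp only [List.map_cons, ih]
    rfl

-- ===== VERDICT (by name: the statement is the Claim_ definition above) =====
theorem hk2sa_spec : Claim_equal_hk2sa := by
  intro s _
  unfold Spec_hk2sa hk2sa hk2sa_alt
  refine congrArg String.ofList ?_
  rw [PySem.Str.toList_replace, PySem.Str.toList_replace, PySem.Str.toList_replace]
  have eS : ("S" : String).toList = ['S'] := rfl
  have eR : ("R" : String).toList = ['R'] := rfl
  have esh : ("sh" : String).toList = ['s', 'h'] := rfl
  have eRR : ("RR" : String).toList = ['R', 'R'] := rfl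
  have eri : ("ṛi" : String).toList = ['ṛ', 'i'] := rfl
  have erii : ("ṛī" : String).toList = ['ṛ', 'ī'] := rfl
  rw [eS, eR, esh, eRR, eri, erii, replaceS_eq, replaceRR_eq, replaceR_eq, pipeline_eq_scan]
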